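-- pv_equiv track=rewrite | github.com/KingFausto/python-compiler | compilador.py | _arreglar_strings
-- ===== SOURCE A (Python) =====
-- def _arreglar_strings(codigo: str) -> list:
--     codigo: list = codigo.split()
--     nuevo_codigo: list = []
--     value: str = ""
--     creando_string: bool = False
--
--     for i in codigo:
--         if creando_string:
--             if i.endswith('"'):
--                 nuevo_codigo.append(value + " " + i)
--                 value = ""
--                 creando_string = False
--             else:
--                 value += " " + i
--         else:
--             if i.startswith('"'):
--                 if i.endswith('"') and len(i) > 1:
--                     nuevo_codigo.append(i)
--                 else:
--                     creando_string = True
--                     value += i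
--             else:
--                 nuevo_codigo.append(i)
--
--     return nuevo_codigo
-- ===== SOURCE B (Python) =====
-- def _arreglar_strings(codigo: str) -> list:
--     toks = codigo.split()
--     out = []
--     n = len(toks)
--     i = 0
--     while i < n:
--         t = toks[i]
--         if t.startswith('"') and not (t.endswith('"') and len(t) > 1):
--             # opener that does not self-close: gather tokens up to the closer
--             j = i + 1
--             parts = [t]
--             while j < n and not toks[j].endswith('"'):
--                 parts.append(toks[j])
--                 j += 1
--             if j < n:
--                 parts.append(toks[j])
--                 out.append(" ".join(parts))
--             i = j + 1
--         else:
--             out.append(t)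
--             i += 1
--     return out
-- ===== Notes on version B (the rewrite author's own statement) =====
-- stated objective: alternative
-- what changed: Replaced A's single pass with a boolean creando_string flag and a growing value accumulator by a nested scanner: an outer walk over the tokens that, on a non-self-closing opener, runs an inner gather loop collecting tokens up to the closing quote and emits the space-joined parts at once.
import Mathlib
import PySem

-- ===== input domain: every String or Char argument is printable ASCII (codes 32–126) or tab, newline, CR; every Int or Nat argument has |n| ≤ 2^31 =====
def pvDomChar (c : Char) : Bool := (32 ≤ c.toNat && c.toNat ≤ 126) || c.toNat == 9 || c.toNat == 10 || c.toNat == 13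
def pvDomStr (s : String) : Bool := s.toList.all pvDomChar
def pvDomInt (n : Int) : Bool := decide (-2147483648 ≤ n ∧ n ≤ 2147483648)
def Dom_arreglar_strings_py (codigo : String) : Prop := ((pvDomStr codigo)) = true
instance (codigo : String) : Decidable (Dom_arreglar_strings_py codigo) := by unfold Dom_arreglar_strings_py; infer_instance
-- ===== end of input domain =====

-- B rewrites A's boolean-flag accumulator as an index-free scanner: an outer walk over the
-- tokens with an inner gather loop that collects a quoted string up to its closing token
-- (objective: alternative decomposition, same cost).

-- ===== PORT A =====
-- one step of A's for-loop over the state (nuevo_codigo, value, creando_string)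
def pvStepA (st : List String × String × Bool) (i : String) : List String × String × Bool :=
  match st with
  | (nc, value, creando) =>
    if creando then
      if PySem.Str.endswith i "\"" then (nc ++ [value ++ " " ++ i], "", false)
      else (nc, value ++ " " ++ i, true)
    else
      if PySem.Str.startswith i "\"" then
        if PySem.Str.endswith i "\"" && decide (1 < PySem.Str.len i) then (nc ++ [i], value, false)
        else (nc, value ++ i, true)
      else (nc ++ [i], value, false)

def arreglar_strings_py (codigo : String) : List String :=
  ((PySem.Str.split₀ codigo).foldl pvStepA ([], "", false)).1

-- ===== PORT B =====
-- B's opener test: starts a string without closing it itself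
def pvOpensB (t : String) : Bool :=
  PySem.Str.startswith t "\"" && !(PySem.Str.endswith t "\"" && decide (1 < PySem.Str.len t))

-- B's inner gather loop: collect tokens into parts until one ends with '"';
-- returns the joined string literal and the remaining tokens, or none if the string is unclosed
def pvGatherB (parts : List String) : List String → Option (String × List String)
  | [] => none
  | x :: xs =>
    if PySem.Str.endswith x "\"" then some (PySem.Str.join " " (parts ++ [x]), xs)
    else pvGatherB (parts ++ [x]) xs

-- termination helper for pvScanB (cited by its decreasing_by)
theorem pvGatherB_length : ∀ (xs parts : List String) (s : String) (r : List String),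
    pvGatherB parts xs = some (s, r) → r.length < xs.length := by
  intro xs
  induction xs with
  | nil => intro parts s r h; simp [pvGatherB] at h
  | cons x xs ih =>
    intro parts s r h
    simp only [pvGatherB] at h
    split at h
    · cases h; simp
    · have := ih _ _ _ h
      simp; omega

-- B's outer while-loop over the remaining tokens
def pvScanB : List String → List String
  | [] => []
  | t :: rest =>
    if pvOpensB t then
      match hg : pvGatherB [t] rest with
      | none => []
      | some (s, r) => s :: pvScanB r
    else t :: pvScanB rest
termination_by l => l.length
decreasing_by
  · exact Nat.lt_succ_of_lt (pvGatherB_length _ _ _ _ hg)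
  · simp

def arreglar_strings_py_alt (codigo : String) : List String :=
  pvScanB (PySem.Str.split₀ codigo)

-- ===== PRECONDITION & SPEC =====
def Spec_arreglar_strings_py (codigo : String) (out : List String) : Prop := out = arreglar_strings_py_alt codigo
instance (codigo : String) (out : List String) : Decidable (Spec_arreglar_strings_py codigo out) := by unfold Spec_arreglar_strings_py; infer_instance

-- ===== CLAIM (what is proved, stated in full; the proofs are below) =====
def Claim_equal_arreglar_strings_py : Prop := ∀ (codigo : String), Dom_arreglar_strings_py codigo → Spec_arreglar_strings_py codigo (arreglar_strings_py codigo)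

-- ===== LEMMAS AND PROOFS =====

theorem pvCharsJoinApp (sep : List Char) (l : List (List Char)) (x : List Char) (h : l ≠ []) :
    PySem.Chars.join sep (l ++ [x]) = PySem.Chars.join sep l ++ sep ++ x := by
  induction l with
  | nil => simp at h
  | cons a l ih =>
    cases l with
    | nil => simp [PySem.Chars.join_cons_cons, PySem.Chars.join_singleton]
    | cons b l' =>
      rw [List.cons_append, PySem.Chars.join_cons_cons]
      rw [List.cons_append] at ih ⊢
      rw [PySem.Chars.join_cons_cons, ih (by simp)]
      simp [List.append_assoc]

theorem pvJoinApp (parts : List String) (x : String) (h : parts ≠ []) :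
    PySem.Str.join " " (parts ++ [x]) = PySem.Str.join " " parts ++ " " ++ x := by
  have hm := pvCharsJoinApp [' '] (parts.map String.toList) x.toList (by simpa using h)
  apply String.toList_inj.mp
  simp [PySem.Str.toList_join, hm]

theorem pvEmptyApp (x : String) : "" ++ x = x := by
  apply String.toList_inj.mp; simp

theorem pvJoinSingle (x : String) : PySem.Str.join " " [x] = x := by
  apply String.toList_inj.mp
  simp [PySem.Str.toList_join, PySem.Chars.join_singleton]

theorem pvMain : ∀ (n : Nat) (xs : List String), xs.length ≤ n →
    (∀ out, (xs.foldl pvStepA (out, "", false)).1 = out ++ pvScanB xs) ∧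
    (∀ (out parts : List String), parts ≠ [] →
      ((xs.foldl pvStepA (out, PySem.Str.join " " parts, true)).1 =
        out ++ (match pvGatherB parts xs with
                | none => []
                | some (s, r) => s :: pvScanB r))) := by
  intro n
  induction n with
  | zero =>
    intro xs h
    have hx : xs = [] := by cases xs <;> simp_all
    subst hx
    constructor
    · intro out; simp [pvScanB]
    · intro out parts _; simp [pvGatherB]
  | succ n ih =>
    intro xs h
    cases xs with
    | nil =>
      constructor
      · intro out; simp [pvScanB]
      · intro out parts _; simp [pvGatherB]
    | cons x xs' =>
      have hx : xs'.length ≤ n := by simpa using h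
      constructor
      · intro out
        rw [List.foldl_cons]
        by_cases hs : PySem.Str.startswith x "\"" = true
        · by_cases hc : (PySem.Str.endswith x "\"" && decide (1 < PySem.Str.len x)) = true
          · simp only [pvStepA, Bool.false_eq_true, if_false, hs, hc, if_true]
            rw [(ih xs' hx).1 (out ++ [x])]
            have ho : pvOpensB x = false := by
              simp only [pvOpensB, hs, hc, Bool.true_and, Bool.not_true]
            simp only [pvScanB, ho, Bool.false_eq_true, if_false]
            simp
          · simp only [pvStepA, Bool.false_eq_true, if_false, hs, hc, if_true]
            rw [pvEmptyApp]
            have hIH := (ih xs' hx).2 out [x] (by simp)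
            rw [pvJoinSingle] at hIH
            rw [hIH]
            have ho : pvOpensB x = true := by
              simp only [pvOpensB, hs, Bool.true_and, Bool.not_eq_true']
              simpa using hc
            simp only [pvScanB, ho, if_true]
            rcases hgv : pvGatherB [x] xs' with _ | ⟨sj, r⟩ <;> simp [hgv]
        · simp only [pvStepA, Bool.false_eq_true, if_false, hs]
          rw [(ih xs' hx).1 (out ++ [x])]
          have hs' : ¬ PySem.Chars.startswith x.toList ['\"'] = true := by simpa using hs
          have ho : pvOpensB x = false := by simp [pvOpensB, hs']
          simp [pvScanB, ho]
      · intro out parts hp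
        rw [List.foldl_cons]
        by_cases he : PySem.Str.endswith x "\"" = true
        · have he' : PySem.Chars.endswith x.toList ['\"'] = true := by simpa using he
          simp only [pvStepA, Bool.false_eq_true, if_false, he, if_true]
          rw [(ih xs' hx).1 (out ++ [PySem.Str.join " " parts ++ " " ++ x])]
          simp [pvGatherB, he', pvJoinApp parts x hp]
        · have he' : ¬ PySem.Chars.endswith x.toList ['\"'] = true := by simpa using he
          simp only [pvStepA, Bool.false_eq_true, if_false, he, if_true]
          have hIH := (ih xs' hx).2 out (parts ++ [x]) (by simp)
          rw [pvJoinApp parts x hp] at hIH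
          rw [hIH]
          simp [pvGatherB, he']

-- ===== VERDICT (by name: the statement is the Claim_ definition above) =====
theorem arreglar_strings_py_spec : Claim_equal_arreglar_strings_py := by
  intro codigo _
  unfold Spec_arreglar_strings_py arreglar_strings_py arreglar_strings_py_alt
  simpa using (pvMain (PySem.Str.split₀ codigo).length _ le_rfl).1 []
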